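-- pv_equiv track=rewrite | github.com/manwar/perlweeklychallenge-club | challenge-248/packy-anderson/python/ch-2.py | submatrixSum
-- ===== SOURCE A (Python) =====
-- def submatrixSum(a):
--     # subtract 1 because we're 0-indexed
--     M = len(a) - 1    # rows
--     N = len(a[0]) - 1 # columns
--     # we are ASSUMING the matrix is consistent with
--     # each row having the same number of columns
--     b = []
--     for i in range(M):
--         row = []
--         for k in range(N):
--             row.append( a[i  ][k] + a[i  ][k+1] +
--                         a[i+1][k] + a[i+1][k+1] )
--         b.append(row)
--     return b
-- ===== SOURCE B (Python) =====
-- def submatrixSum(a):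
--     # subtract 1 because we're 0-indexed
--     N = len(a[0]) - 1  # columns
--     # pass 1: horizontal adjacent-pair sums for every row
--     h = [[row[k] + row[k + 1] for k in range(N)] for row in a]
--     # pass 2: add vertically adjacent rows of h, reusing each pair sum twice
--     return [[x + y for x, y in zip(hi, hj)] for hi, hj in zip(h, h[1:])]
-- ===== Notes on version B (the rewrite author's own statement) =====
-- stated objective: alternative
-- what changed: B replaces the single nested loop doing four lookups per output cell by two differently-shaped passes: it first builds a table h of horizontal adjacent-pair sums for every row, then zips vertically adjacent rows of h so each horizontal pair sum is computed once and reused by two output rows.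
import Mathlib
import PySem

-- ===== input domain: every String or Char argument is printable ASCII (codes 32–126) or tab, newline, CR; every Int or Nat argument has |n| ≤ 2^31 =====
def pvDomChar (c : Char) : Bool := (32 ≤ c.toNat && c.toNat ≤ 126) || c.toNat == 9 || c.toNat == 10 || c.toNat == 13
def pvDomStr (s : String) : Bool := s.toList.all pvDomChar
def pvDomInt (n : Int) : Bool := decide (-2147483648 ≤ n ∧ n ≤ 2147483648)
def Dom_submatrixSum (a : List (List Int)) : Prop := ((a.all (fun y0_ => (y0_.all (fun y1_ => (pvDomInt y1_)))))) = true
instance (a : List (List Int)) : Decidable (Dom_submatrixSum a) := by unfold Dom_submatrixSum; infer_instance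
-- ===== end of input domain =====

-- B reorganises the computation into two passes over an intermediate table of horizontal
-- pair sums (each computed once and reused by two output rows) instead of four direct
-- lookups per cell; same asymptotic cost (objective: alternative).

-- ===== PORT A =====
-- a[i][k] under Pre_ (indices in range there); pyGetD is exact on in-range indices
def pvAGet (a : List (List Int)) (i k : Int) : Int :=
  PySem.List.pyGetD (PySem.List.pyGetD a i []) k 0

def submatrixSum (a : List (List Int)) : List (List Int) :=
  let M : Int := (a.length : Int) - 1
  let N : Int := ((PySem.List.pyGetD a 0 []).length : Int) - 1
  (PySem.List.pyRange 0 M 1).map (fun i =>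
    (PySem.List.pyRange 0 N 1).map (fun k =>
      pvAGet a i k + pvAGet a i (k + 1) +
      pvAGet a (i + 1) k + pvAGet a (i + 1) (k + 1)))

-- ===== PORT B =====
-- [row[k] + row[k+1] for k in range(N)]
def pvPairSums (row : List Int) (N : Int) : List Int :=
  (PySem.List.pyRange 0 N 1).map
    (fun k => PySem.List.pyGetD row k 0 + PySem.List.pyGetD row (k + 1) 0)

def submatrixSum_alt (a : List (List Int)) : List (List Int) :=
  let N : Int := ((PySem.List.pyGetD a 0 []).length : Int) - 1
  let h := a.map (fun row => pvPairSums row N)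
  -- zip(h, h[1:]); h[1:] = h.drop 1 (exact for a nonnegative slice start)
  (h.zip (h.drop 1)).map (fun p => (p.1.zip p.2).map (fun q => q.1 + q.2))

-- ===== PRECONDITION & SPEC =====
-- Exactly where Python A returns: a nonempty, and when the first row has ≥ 2 columns
-- every row must be at least that wide (otherwise a[0] / a[i][k+1] raises IndexError).
def Pre_submatrixSum (a : List (List Int)) : Prop :=
  a ≠ [] ∧ (2 ≤ a.headI.length → ∀ r ∈ a, a.headI.length ≤ r.length)
instance (a : List (List Int)) : Decidable (Pre_submatrixSum a) := by
  unfold Pre_submatrixSum; infer_instance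

def pvWitness_submatrixSum : List (List Int) := [[1, 2, 3], [4, 5, 6], [7, 8, 9]]

def Spec_submatrixSum (a : List (List Int)) (out : List (List Int)) : Prop := out = submatrixSum_alt a
instance (a : List (List Int)) (out : List (List Int)) : Decidable (Spec_submatrixSum a out) := by unfold Spec_submatrixSum; infer_instance

-- ===== CLAIM (what is proved, stated in full; the proofs are below) =====
def Claim_equal_submatrixSum : Prop := ∀ (a : List (List Int)), Dom_submatrixSum a → Pre_submatrixSum a → Spec_submatrixSum a (submatrixSum a)

-- ===== LEMMAS AND PROOFS =====

-- zip of a list with its own tail, as a map over indices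
theorem pv_zip_drop_map (h : List (List Int)) (F : List Int × List Int → List Int) :
    (h.zip (h.drop 1)).map F
      = (List.range (h.length - 1)).map (fun i => F (h.getD i [], h.getD (i + 1) [])) := by
  apply List.ext_getElem
  · simp only [List.length_map, List.length_zip, List.length_drop, List.length_range]
    omega
  · intro i hi₁ hi₂
    simp only [List.length_map, List.length_zip, List.length_drop, List.length_range] at hi₁ hi₂
    have hia : i < h.length := by omega
    have hib : i + 1 < h.length := by omega
    simp only [List.getElem_map, List.getElem_zip, List.getElem_drop, List.getElem_range,
      List.getD_eq_getElem _ _ hia, List.getD_eq_getElem _ _ hib]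
    simp only [show 1 + i = i + 1 from by omega]

theorem pv_ports_eq (a : List (List Int)) : submatrixSum a = submatrixSum_alt a := by
  unfold submatrixSum submatrixSum_alt
  simp only [PySem.List.pyRange_one, zero_add, Int.sub_zero]
  rw [pv_zip_drop_map]
  simp only [List.length_map, List.map_map]
  have hM : ((a.length : Int) - 1).toNat = a.length - 1 := by omega
  have hN : (((PySem.List.pyGetD a 0 []).length : Int) - 1).toNat
      = (PySem.List.pyGetD a 0 []).length - 1 := by omega
  rw [hM, hN]
  apply List.map_congr_left
  intro i hi
  have hi' : i + 1 < a.length := by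
    have := List.mem_range.mp hi; omega
  simp only [Function.comp]
  simp only [List.getD, List.getElem?_map,
    List.getElem?_eq_getElem (show i < a.length by omega),
    List.getElem?_eq_getElem hi', Option.map_some, Option.getD_some]
  unfold pvPairSums
  simp only [PySem.List.pyRange_one, zero_add, Int.sub_zero, List.map_map, List.zip_map',
    List.map_map, hN]
  apply List.map_congr_left
  intro k _
  simp only [Function.comp]
  unfold pvAGet
  have h2 : PySem.List.pyGetD a ((i : Int) + 1) [] = a[i + 1] := by
    rw [show ((i : Int) + 1) = ((i + 1 : Nat) : Int) by push_cast; ring,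
        PySem.List.pyGetD_natCast, List.getD_eq_getElem _ _ hi']
  rw [PySem.List.pyGetD_natCast a i [], h2, List.getD_eq_getElem _ _ (by omega : i < a.length)]
  ring

-- ===== VERDICT (by name: the statement is the Claim_ definition above) =====
theorem submatrixSum_spec : Claim_equal_submatrixSum := by
  intro a _ _
  exact pv_ports_eq a
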